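-- pv_equiv track=rewrite | github.com/Lisbooa16/ia_clip | clips/viral_engine/hooks.py | urgency
-- ===== SOURCE A (Python) =====
-- def _lower(seg):
--     return seg.get("text", "").lower()
--
-- def urgency(seg):
--     text = _lower(seg)
--     patterns = [
--         "agora", "right now", "última chance", "ultima chance",
--         "antes que seja tarde", "antes que acabe",
--         "corre", "hurry", "não perde", "não perca", "don't miss",
--     ]
--     return any(p in text for p in patterns)
-- ===== SOURCE B (Python) =====
-- def urgency(seg):
--     # One left-to-right scan over the text: at each suffix, test whether some
--     # keyword starts there, instead of k independent substring searches.
--     text = seg.get("text", "").lower()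
--     patterns = [
--         "agora", "right now", "última chance", "ultima chance",
--         "antes que seja tarde", "antes que acabe",
--         "corre", "hurry", "não perde", "não perca", "don't miss",
--     ]
--     suffix = text
--     while True:
--         for p in patterns:
--             if suffix.startswith(p):
--                 return True
--         if not suffix:
--             return False
--         suffix = suffix[1:]
-- ===== Notes on version B (the rewrite author's own statement) =====
-- stated objective: alternative
-- what changed: Replaced the per-keyword 'p in text' substring searches with a single left-to-right scan over the text that tests at each suffix whether any keyword starts there.
import Mathlib
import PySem

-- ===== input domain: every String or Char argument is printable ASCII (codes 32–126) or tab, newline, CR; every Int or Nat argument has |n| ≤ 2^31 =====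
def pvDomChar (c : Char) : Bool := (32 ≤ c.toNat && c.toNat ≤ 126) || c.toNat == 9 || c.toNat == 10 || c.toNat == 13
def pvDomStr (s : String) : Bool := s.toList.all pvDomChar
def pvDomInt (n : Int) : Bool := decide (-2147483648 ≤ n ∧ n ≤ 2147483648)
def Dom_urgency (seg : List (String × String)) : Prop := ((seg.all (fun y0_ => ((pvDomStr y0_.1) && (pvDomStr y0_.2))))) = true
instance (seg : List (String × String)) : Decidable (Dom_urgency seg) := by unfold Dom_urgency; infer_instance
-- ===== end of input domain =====

-- B replaces the per-keyword substring searches with one left-to-right scan that tests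
-- each suffix against all keywords (objective: alternative; same cost class).

-- the shared keyword list
def urgencyPatterns : List String :=
  ["agora", "right now", "última chance", "ultima chance",
   "antes que seja tarde", "antes que acabe",
   "corre", "hurry", "não perde", "não perca", "don't miss"]

-- ===== PORT A =====
-- _lower(seg) = seg.get("text", "").lower()
def urgencyLowerA (seg : List (String × String)) : String :=
  PySem.Str.lower (PySem.Dict.getD (PySem.Dict.mk seg) "text" "")

-- any(p in text for p in patterns)
def urgency (seg : List (String × String)) : Bool :=
  let text := urgencyLowerA seg
  urgencyPatterns.any (fun p => PySem.Str.isIn p text)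

-- ===== PORT B =====
-- the while-loop of Source B: at each suffix, test whether some keyword starts there;
-- stop with False once the suffix is empty.
def urgencyScan (pats : List String) : List Char → Bool
  | [] => pats.any (fun p => PySem.Chars.startswith [] p.toList)
  | c :: t =>
      pats.any (fun p => PySem.Chars.startswith (c :: t) p.toList) || urgencyScan pats t

def urgency_alt (seg : List (String × String)) : Bool :=
  let text := PySem.Str.lower (PySem.Dict.getD (PySem.Dict.mk seg) "text" "")
  urgencyScan urgencyPatterns text.toList

-- ===== PRECONDITION & SPEC =====
def Spec_urgency (seg : List (String × String)) (out : Bool) : Prop := out = urgency_alt seg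
instance (seg : List (String × String)) (out : Bool) : Decidable (Spec_urgency seg out) := by unfold Spec_urgency; infer_instance

-- ===== CLAIM (what is proved, stated in full; the proofs are below) =====
def Claim_equal_urgency : Prop := ∀ (seg : List (String × String)), Dom_urgency seg → Spec_urgency seg (urgency seg)

-- ===== LEMMAS AND PROOFS =====

-- the scan finds exactly the patterns occurring as substrings
theorem urgencyScan_eq_any_isIn (pats : List String) (s : List Char) :
    urgencyScan pats s = pats.any (fun p => PySem.Chars.isIn p.toList s) := by
  induction s with
  | nil =>
      simp only [urgencyScan]
      refine List.any_congr rfl (fun p => ?_)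
      rw [Bool.eq_iff_iff, PySem.Chars.startswith_iff, PySem.Chars.isIn_iff_infix]
      constructor
      · intro h; exact h.isInfix
      · intro h; simpa using List.eq_nil_of_infix_nil h
  | cons c t ih =>
      simp only [urgencyScan, ih]
      rw [Bool.eq_iff_iff]
      simp only [Bool.or_eq_true, List.any_eq_true,
        PySem.Chars.startswith_iff, PySem.Chars.isIn_iff_infix]
      constructor
      · rintro (⟨p, hp, h⟩ | ⟨p, hp, h⟩)
        · exact ⟨p, hp, h.isInfix⟩
        · exact ⟨p, hp, List.infix_cons_iff.mpr (Or.inr h)⟩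
      · rintro ⟨p, hp, h⟩
        rcases List.infix_cons_iff.mp h with h' | h'
        · exact Or.inl ⟨p, hp, h'⟩
        · exact Or.inr ⟨p, hp, h'⟩

-- ===== VERDICT (by name: the statement is the Claim_ definition above) =====
theorem urgency_spec : Claim_equal_urgency := by
  intro seg _
  unfold Spec_urgency urgency urgency_alt urgencyLowerA
  rw [urgencyScan_eq_any_isIn]
  refine List.any_congr rfl (fun p => ?_)
  rw [PySem.Str.isIn_eq]
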